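-- pv_equiv track=rewrite | github.com/chrisms91/Codewars | python/Consecutive strings.py | longest_consec
-- ===== SOURCE A (Python) =====
-- def longest_consec(strarr, k):
--     n = len(strarr)
--     longest = ""
--
--     if((n == 0) or (k > n) or (k <= 0)):
--         return ""
--     else:
--         for index in range(0, n - k+1):
--             current = "".join(strarr[index:index+k])
--
--             if(len(longest) < len(current)):
--                 longest = current
--     return longest
-- ===== SOURCE B (Python) =====
-- def longest_consec(strarr, k):
--     n = len(strarr)
--     if n == 0 or k > n or k <= 0:
--         return ""
--     prefix = [0]
--     total = 0
--     for s in strarr: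
--         total += len(s)
--         prefix.append(total)
--     best = 0
--     best_len = prefix[k] - prefix[0]
--     for i in range(1, n - k + 1):
--         w = prefix[i + k] - prefix[i]
--         if w > best_len:
--             best, best_len = i, w
--     return "".join(strarr[best:best + k])
-- ===== Notes on version B (the rewrite author's own statement) =====
-- stated objective: faster
-- what changed: Instead of joining every k-window and comparing string lengths (O(n*k) characters copied), B builds prefix sums of the string lengths once, scans the window sums to find the first maximal window, and joins only that one window.
import Mathlib
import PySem

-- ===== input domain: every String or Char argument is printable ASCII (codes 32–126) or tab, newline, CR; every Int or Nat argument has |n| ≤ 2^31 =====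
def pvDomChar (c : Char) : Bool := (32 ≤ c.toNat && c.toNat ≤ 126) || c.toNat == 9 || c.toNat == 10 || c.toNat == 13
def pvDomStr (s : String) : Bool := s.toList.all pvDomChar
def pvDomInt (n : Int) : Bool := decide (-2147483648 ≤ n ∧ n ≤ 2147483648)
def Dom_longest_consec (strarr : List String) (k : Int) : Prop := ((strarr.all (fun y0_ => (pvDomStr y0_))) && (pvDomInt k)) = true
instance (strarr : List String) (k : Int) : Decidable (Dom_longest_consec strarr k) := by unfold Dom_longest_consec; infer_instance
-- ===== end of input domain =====

-- B replaces A's join-every-window scan by one pass of prefix sums of lengths plus a single final join (objective: faster).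

-- ===== PORT A =====
-- literal transliteration of Source A: for each window join it and keep the longest so far
def longest_consec (strarr : List String) (k : Int) : String :=
  let n : Int := PySem.List.len strarr
  let longest : String := ""
  if n = 0 ∨ k > n ∨ k ≤ 0 then ""
  else
    (PySem.List.pyRange 0 (n - k + 1) 1).foldl
      (fun longest index =>
        let current := PySem.Str.join "" (PySem.List.slice strarr (some index) (some (index + k)))
        if PySem.Str.len longest < PySem.Str.len current then current else longest)
      longest

-- ===== PORT B =====
-- literal transliteration of Source B: prefix sums of lengths, argmax window, one join
def longest_consec_alt (strarr : List String) (k : Int) : String :=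
  let n : Int := PySem.List.len strarr
  if n = 0 ∨ k > n ∨ k ≤ 0 then ""
  else
    let pt := strarr.foldl
      (fun (st : List Int × Int) s =>
        let total := st.2 + PySem.Str.len s
        (st.1 ++ [total], total))
      ([0], 0)
    let pre := pt.1
    let bb := (PySem.List.pyRange 1 (n - k + 1) 1).foldl
      (fun (st : Int × Int) i =>
        let w := PySem.List.pyGetD pre (i + k) 0 - PySem.List.pyGetD pre i 0
        if w > st.2 then (i, w) else st)
      (0, PySem.List.pyGetD pre k 0 - PySem.List.pyGetD pre 0 0)
    PySem.Str.join "" (PySem.List.slice strarr (some bb.1) (some (bb.1 + k)))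

-- ===== PRECONDITION & SPEC =====
def Spec_longest_consec (strarr : List String) (k : Int) (out : String) : Prop := out = longest_consec_alt strarr k
instance (strarr : List String) (k : Int) (out : String) : Decidable (Spec_longest_consec strarr k out) := by unfold Spec_longest_consec; infer_instance

-- ===== CLAIM (what is proved, stated in full; the proofs are below) =====
def Claim_equal_longest_consec : Prop := ∀ (strarr : List String) (k : Int), Dom_longest_consec strarr k → Spec_longest_consec strarr k (longest_consec strarr k)

-- ===== LEMMAS AND PROOFS =====

-- total length (as Int) of a list of strings
def pvP (ys : List String) : Int := (ys.map PySem.Str.len).sum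

theorem pvP_nil : pvP [] = 0 := rfl
theorem pvP_cons (y : String) (ys : List String) : pvP (y :: ys) = PySem.Str.len y + pvP ys := by
  simp [pvP]
theorem pvP_append (xs ys : List String) : pvP (xs ++ ys) = pvP xs + pvP ys := by
  simp [pvP]

theorem chars_join_len : ∀ (ps : List (List Char)), (PySem.Chars.join [] ps).length = (ps.map List.length).sum
  | [] => by simp [PySem.Chars.join_nil]
  | [p] => by simp [PySem.Chars.join_singleton]
  | p :: q :: rest => by
      rw [PySem.Chars.join_cons_cons]
      simp [chars_join_len (q :: rest)]

theorem join_len (ys : List String) : PySem.Str.len (PySem.Str.join "" ys) = pvP ys := by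
  rw [PySem.Str.len_eq, PySem.Str.toList_join]
  have : ("" : String).toList = [] := by simp
  rw [this, chars_join_len]
  rw [pvP, List.map_map, Nat.cast_list_sum, List.map_map]
  congr 1

-- the prefix-sum fold of B, characterised
theorem prefix_fold : ∀ (xs : List String) (p : List Int) (t : Int),
    (xs.foldl
      (fun (st : List Int × Int) s =>
        let total := st.2 + PySem.Str.len s
        (st.1 ++ [total], total))
      (p, t)).1
    = p ++ (List.range xs.length).map (fun j => t + pvP (xs.take (j + 1)))
  | [], p, t => by simp
  | x :: xs, p, t => by
      simp only [List.foldl_cons]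
      rw [prefix_fold xs (p ++ [t + PySem.Str.len x]) (t + PySem.Str.len x)]
      rw [List.length_cons, List.range_succ_eq_map]
      simp [Function.comp, pvP_cons, pvP_nil, add_assoc]

theorem prefix_elems (xs : List String) :
    (xs.foldl
      (fun (st : List Int × Int) s =>
        let total := st.2 + PySem.Str.len s
        (st.1 ++ [total], total))
      (([0], 0) : List Int × Int)).1
    = (List.range (xs.length + 1)).map (fun j => pvP (xs.take j)) := by
  rw [prefix_fold]
  rw [List.range_succ_eq_map]
  simp [List.map_map, Function.comp, pvP]

theorem pre_get (xs : List String) (i : Int) (h0 : 0 ≤ i) (h1 : i ≤ (xs.length : Int)) :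
    PySem.List.pyGetD ((List.range (xs.length + 1)).map (fun j => pvP (xs.take j))) i 0
    = pvP (xs.take i.toNat) := by
  have hlt : i.toNat < xs.length + 1 := by omega
  rw [PySem.List.pyGetD_eq_getElem _ _ h0 (by simp; omega)]
  simp

theorem window_sum (xs : List String) (i k : Int) (h0 : 0 ≤ i) (hk : 0 ≤ k) :
    pvP (xs.take (i + k).toNat) - pvP (xs.take i.toNat)
    = pvP ((xs.drop i.toNat).take k.toNat) := by
  have h : (i + k).toNat = i.toNat + k.toNat := by omega
  rw [h, List.take_add, pvP_append]
  ring

-- the two loops agree: A's running longest string equals B's running best window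
theorem loop_eq (w : Int → String) (S : Int → Int) :
    ∀ (l : List Int) (b bl : Int),
      (∀ j ∈ l, S j = PySem.Str.len (w j)) → bl = PySem.Str.len (w b) →
      l.foldl (fun acc j => if PySem.Str.len acc < PySem.Str.len (w j) then w j else acc) (w b)
      = w ((l.foldl (fun (st : Int × Int) j => if S j > st.2 then (j, S j) else st) (b, bl)).1)
  | [], b, bl, _, _ => rfl
  | j :: l, b, bl, hmem, hbl => by
      simp only [List.foldl_cons]
      have hj : S j = PySem.Str.len (w j) := hmem j (by simp)
      by_cases h : PySem.Str.len (w b) < PySem.Str.len (w j)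
      · rw [if_pos h, if_pos (by omega : S j > bl)]
        exact loop_eq w S l j (S j) (fun x hx => hmem x (by simp [hx])) hj
      · rw [if_neg h, if_neg (by omega : ¬ S j > bl)]
        exact loop_eq w S l b bl (fun x hx => hmem x (by simp [hx])) hbl

theorem empty_of_len_nonpos (s : String) (h : PySem.Str.len s ≤ 0) : s = "" := by
  rw [PySem.Str.len_eq] at h
  have : s.toList = [] := by
    apply List.eq_nil_of_length_eq_zero
    omega
  have := congrArg String.ofList this
  simpa using this

-- ===== VERDICT (by name: the statement is the Claim_ definition above) =====
theorem longest_consec_spec : Claim_equal_longest_consec := by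
  intro strarr k _
  unfold Spec_longest_consec longest_consec longest_consec_alt
  simp only []
  set n : Int := PySem.List.len strarr with hn
  by_cases hg : n = 0 ∨ k > n ∨ k ≤ 0
  · rw [if_pos hg, if_pos hg]
  · rw [if_neg hg, if_neg hg]
    rw [not_or, not_or] at hg
    obtain ⟨hn0, hkn, hk0⟩ := hg
    rw [not_lt] at hkn
    rw [not_le] at hk0
    have hnlen : n = (strarr.length : Int) := by rw [hn, PySem.List.len_eq]
    -- B's prefix list
    rw [prefix_elems]
    set pre : List Int := (List.range (strarr.length + 1)).map (fun j => pvP (strarr.take j)) with hpre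
    -- abbreviations
    set w : Int → String := fun i => PySem.Str.join "" (PySem.List.slice strarr (some i) (some (i + k))) with hw
    set S : Int → Int := fun i => PySem.List.pyGetD pre (i + k) 0 - PySem.List.pyGetD pre i 0 with hS
    have hwin : ∀ i : Int, 0 ≤ i → i + k ≤ n → S i = PySem.Str.len (w i) := by
      intro i hi hik
      rw [hS, hw]
      simp only []
      rw [hpre, pre_get strarr (i + k) (by omega) (by omega),
          pre_get strarr i hi (by omega),
          window_sum strarr i k hi (by omega),
          PySem.List.slice_toNat strarr hi (by omega), join_len]
      have : (i + k).toNat - i.toNat = k.toNat := by omega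
      rw [this]
    -- split off the first index of A's range
    have hrange : PySem.List.pyRange 0 (n - k + 1) 1 = 0 :: PySem.List.pyRange 1 (n - k + 1) 1 := by
      have h01 : (0 : Int) + 1 = 1 := by ring
      rw [PySem.List.pyRange_one_cons (by omega), h01]
    rw [hrange]
    simp only [List.foldl_cons]
    -- the first iteration of A produces w 0
    have hlen0 : PySem.Str.len "" = 0 := by rw [PySem.Str.len_eq]; simp
    have hfirst : (if PySem.Str.len "" < PySem.Str.len (w 0) then w 0 else "") = w 0 := by
      by_cases h : PySem.Str.len "" < PySem.Str.len (w 0)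
      · rw [if_pos h]
      · rw [if_neg h]
        rw [hlen0] at h
        exact (empty_of_len_nonpos (w 0) (by omega)).symm
    -- B's initial best length is S 0
    have hinit : PySem.List.pyGetD pre k 0 - PySem.List.pyGetD pre 0 0 = S 0 := by
      rw [hS]; simp
    rw [hinit]
    have hS0 : S 0 = PySem.Str.len (w 0) := hwin 0 le_rfl (by omega)
    show (PySem.List.pyRange 1 (n - k + 1) 1).foldl
          (fun acc j => if PySem.Str.len acc < PySem.Str.len (w j) then w j else acc)
          (if PySem.Str.len "" < PySem.Str.len (w 0) then w 0 else "")
        = w (((PySem.List.pyRange 1 (n - k + 1) 1).foldl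
            (fun (st : Int × Int) j => if S j > st.2 then (j, S j) else st) (0, S 0)).1)
    rw [hfirst]
    apply loop_eq
    · intro j hj
      rw [PySem.List.mem_pyRange_one] at hj
      exact hwin j (by omega) (by omega)
    · exact hS0
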